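-- pv_equiv track=rewrite | github.com/jawaher-alqotym/Mini-Coding-Challenges | CoderHub-Find_theMissing_letter.py | missingLetter
-- ===== SOURCE A (Python) =====
-- def missingLetter(txt):
--   alpha = 'abcdefghijklmnopqrstuvwxyz'
--   alpha_index = alpha.index(txt[0])
--   s = len(txt)+alpha_index
--   alpha_sub = alpha[alpha_index:s:]
--   j=0
--   while j<len(alpha_sub):
--     if(txt[j] != alpha_sub[j]):
--      return alpha_sub[j]
--     else:
--      j+=1
--
--
--   return 'No Missing Letter'
-- ===== SOURCE B (Python) =====
-- def missingLetter(txt):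
--     alpha = 'abcdefghijklmnopqrstuvwxyz'
--     i0 = alpha.index(txt[0])          # same IndexError/ValueError as A on empty / non a-z first char
--     limit = min(len(txt), 26 - i0)    # the expected run cannot go past 'z'
--     prev = txt[0]
--     for c in txt[1:limit]:
--         if ord(c) - ord(prev) != 1:
--             return chr(ord(prev) + 1)
--         prev = c
--     return 'No Missing Letter'
-- ===== Notes on version B (the rewrite author's own statement) =====
-- stated objective: simpler
-- what changed: B compares adjacent characters locally and returns prev+1 at the first non-unit gap, instead of building the expected alphabet slice and indexing both strings against it; Pre_ excludes inputs where A raises (empty string or first char not a-z).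
import Mathlib
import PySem

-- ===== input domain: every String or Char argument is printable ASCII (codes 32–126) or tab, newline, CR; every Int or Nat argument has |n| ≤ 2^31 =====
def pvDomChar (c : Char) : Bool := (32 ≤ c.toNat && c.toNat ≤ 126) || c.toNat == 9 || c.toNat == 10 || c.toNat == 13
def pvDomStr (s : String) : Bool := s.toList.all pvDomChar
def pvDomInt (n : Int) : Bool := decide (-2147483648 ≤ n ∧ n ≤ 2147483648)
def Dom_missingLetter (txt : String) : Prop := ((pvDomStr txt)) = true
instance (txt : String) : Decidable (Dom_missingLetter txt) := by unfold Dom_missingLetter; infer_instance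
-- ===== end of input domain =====

-- B replaces A's "build the expected alphabet slice and index both strings into it" scan by a
-- local comparison of adjacent characters (simpler decomposition; same O(n) cost).
-- Pre_ excludes exactly the inputs where A raises (empty string / first char not a-z); B raises there too.

-- ===== PORT A =====
def pvStrOfChar (c : Char) : String := String.ofList [c]

def pvAlpha : List Char :=
  ['a','b','c','d','e','f','g','h','i','j','k','l','m',
   'n','o','p','q','r','s','t','u','v','w','x','y','z']

-- A's while loop: j runs while j < len(alpha_sub); txt[j] is in range whenever the loop is
-- reached (len(alpha_sub) ≤ len(txt)); the none-branch of t[j]? is unreachable there.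
def pvALoop (t sub : List Char) (j : Nat) : String :=
  if h : j < sub.length then
    if t[j]? ≠ some (sub[j]) then pvStrOfChar (sub[j])
    else pvALoop t sub (j + 1)
  else "No Missing Letter"
termination_by sub.length - j

def missingLetter (txt : String) : String :=
  let t := txt.toList
  -- alpha.index(txt[0]); txt[0] on empty txt raises IndexError, a miss raises ValueError: both outside Pre_
  match PySem.List.index? pvAlpha (t.headD ' ') with
  | none => ""
  | some ai =>
    let s : Nat := t.length + ai
    let sub := PySem.List.slice pvAlpha (some (ai : Int)) (some (s : Int))
    pvALoop t sub 0

-- ===== PORT B =====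
def pvBWalk (prev : Char) (cs : List Char) : String :=
  match cs with
  | [] => "No Missing Letter"
  | c :: cs' =>
    if (c.toNat : Int) - (prev.toNat : Int) ≠ 1 then pvStrOfChar (Char.ofNat (prev.toNat + 1))
    else pvBWalk c cs'

def missingLetter_alt (txt : String) : String :=
  let t := txt.toList
  match PySem.List.index? pvAlpha (t.headD ' ') with
  | none => ""
  | some i0 =>
    let limit : Nat := min t.length (26 - i0)
    match t with
    | [] => ""   -- unreachable: index? succeeded, so txt[0] exists
    | p :: _ => pvBWalk p (PySem.List.slice t (some (1 : Int)) (some (limit : Int)))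

-- ===== PRECONDITION & SPEC =====
-- Pre_ excludes exactly the inputs on which A raises: the empty string (IndexError on txt[0])
-- and strings whose first character is not a lowercase letter (ValueError from alpha.index).
def Pre_missingLetter (txt : String) : Prop :=
  txt.toList ≠ [] ∧ 97 ≤ (txt.toList.headD ' ').toNat ∧ (txt.toList.headD ' ').toNat ≤ 122
instance (txt : String) : Decidable (Pre_missingLetter txt) := by unfold Pre_missingLetter; infer_instance

def pvWitness_missingLetter : String := "abd"

def Spec_missingLetter (txt : String) (out : String) : Prop := out = missingLetter_alt txt
instance (txt : String) (out : String) : Decidable (Spec_missingLetter txt out) := by unfold Spec_missingLetter; infer_instance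

-- ===== CLAIM (what is proved, stated in full; the proofs are below) =====
def Claim_equal_missingLetter : Prop := ∀ (txt : String), Dom_missingLetter txt → Pre_missingLetter txt → Spec_missingLetter txt (missingLetter txt)

-- ===== LEMMAS AND PROOFS =====

-- the consecutive run of n characters starting at c
def pvRun (c : Char) : Nat → List Char
  | 0 => []
  | n + 1 => c :: pvRun (Char.ofNat (c.toNat + 1)) n

-- structural form of A's elementwise comparison
def pvCmp : List Char → List Char → String
  | _, [] => "No Missing Letter"
  | [], y :: _ => pvStrOfChar y
  | x :: l, y :: s => if x ≠ y then pvStrOfChar y else pvCmp l s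

lemma pvCmp_nil (l : List Char) : pvCmp l [] = "No Missing Letter" := by
  cases l <;> rfl

lemma pvCmp_cons_self (c : Char) (l s : List Char) :
    pvCmp (c :: l) (c :: s) = pvCmp l s := by
  simp [pvCmp]

lemma pv_toNat_ofNat (n : Nat) (h : n < 55296) : (Char.ofNat n).toNat = n := by
  have hv : n.isValidChar := Or.inl h
  simp [Char.ofNat, hv, Char.ofNatAux, Char.toNat]

lemma pv_char_eq_of_toNat {c d : Char} (h : c.toNat = d.toNat) : c = d := by
  rw [← Char.ofNat_toNat c, ← Char.ofNat_toNat d, h]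

lemma pvALoop_eq (t sub : List Char) :
    ∀ n j, sub.length ≤ j + n → pvALoop t sub j = pvCmp (t.drop j) (sub.drop j) := by
  intro n
  induction n with
  | zero =>
    intro j hj
    rw [pvALoop, dif_neg (by omega)]
    have hs : sub.drop j = [] := List.drop_of_length_le (by omega)
    rw [hs, pvCmp_nil]
  | succ n ih =>
    intro j hj
    rw [pvALoop]
    by_cases h : j < sub.length
    · rw [dif_pos h]
      have hsubd : sub.drop j = sub[j] :: sub.drop (j + 1) := List.drop_eq_getElem_cons h
      by_cases ht : j < t.length
      · have htd : t.drop j = t[j] :: t.drop (j + 1) := List.drop_eq_getElem_cons ht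
        have hget : t[j]? = some t[j] := List.getElem?_eq_getElem ht
        rw [hget, hsubd, htd]
        by_cases hne : t[j] = sub[j]
        · rw [if_neg (by simp [hne]), ih (j + 1) (by omega)]
          simp [pvCmp, hne]
        · rw [if_pos (by simp [hne])]
          simp [pvCmp, hne]
      · have hget : t[j]? = none := List.getElem?_eq_none (by omega)
        have htd : t.drop j = [] := List.drop_of_length_le (by omega)
        rw [hget, hsubd, htd, if_pos (by simp)]
        simp [pvCmp]
    · rw [dif_neg h]
      have hs : sub.drop j = [] := List.drop_of_length_le (by omega)
      rw [hs, pvCmp_nil]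

lemma pvRun_take : ∀ (n m : Nat) (c : Char), (pvRun c n).take m = pvRun c (min m n) := by
  intro n
  induction n with
  | zero => intro m c; simp [pvRun]
  | succ n ih =>
    intro m c
    cases m with
    | zero => simp [pvRun]
    | succ m =>
      simp only [pvRun, List.take_succ_cons, ih]
      have h : min (m + 1) (n + 1) = min m n + 1 := by omega
      rw [h, pvRun]

lemma pvCmp_run (k : Nat) : ∀ (c : Char) (l : List Char),
    k ≤ l.length → c.toNat + k < 55295 →
    pvCmp (c :: l) (c :: pvRun (Char.ofNat (c.toNat + 1)) k) = pvBWalk c (l.take k) := by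
  induction k with
  | zero => intro c l _ _; simp [pvCmp, pvRun, pvBWalk]
  | succ k ih =>
    intro c l hlen hv
    obtain ⟨x, l', rfl⟩ : ∃ x l', l = x :: l' := by
      cases l with
      | nil => simp at hlen
      | cons x l' => exact ⟨x, l', rfl⟩
    have hd : (Char.ofNat (c.toNat + 1)).toNat = c.toNat + 1 :=
      pv_toNat_ofNat _ (by omega)
    rw [pvCmp_cons_self, List.take_succ_cons]
    simp only [pvRun, pvBWalk, pvCmp]
    by_cases hx : x = Char.ofNat (c.toNat + 1)
    · have hxn : (x.toNat : Int) - (c.toNat : Int) = 1 := by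
        rw [hx, hd]; push_cast; ring
      rw [if_neg (by simp [hx]), if_neg (by simp [hxn])]
      have step := ih (Char.ofNat (c.toNat + 1)) l' (by simpa using hlen) (by rw [hd]; omega)
      rw [pvCmp_cons_self] at step
      rw [hx]
      exact step
    · have hxn : (x.toNat : Int) - (c.toNat : Int) ≠ 1 := by
        intro hcon
        exact hx (pv_char_eq_of_toNat (by rw [hd]; omega))
      rw [if_pos (by simp [hx]), if_pos (by simp [hxn])]

lemma pv_mem_alpha {c : Char} (h1 : 97 ≤ c.toNat) (h2 : c.toNat ≤ 122) : c ∈ pvAlpha := by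
  rw [← Char.ofNat_toNat c]
  set n := c.toNat with hn
  interval_cases n <;> decide

lemma pv_drop_alpha : ∀ j, j < 26 → pvAlpha.drop j = pvRun (pvAlpha.getD j ' ') (26 - j) := by
  decide

lemma missingLetter_eq_alt (txt : String)
    (hpre : Pre_missingLetter txt) : missingLetter txt = missingLetter_alt txt := by
  obtain ⟨hne, h1, h2⟩ := hpre
  obtain ⟨p, rest, hts⟩ : ∃ p rest, txt.toList = p :: rest := by
    cases h : txt.toList with
    | nil => exact absurd h hne
    | cons p rest => exact ⟨p, rest, rfl⟩
  rw [hts] at h1 h2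
  simp only [List.headD_cons] at h1 h2
  have hmem : p ∈ pvAlpha := pv_mem_alpha h1 h2
  obtain ⟨ai, hai⟩ : ∃ ai, PySem.List.index? pvAlpha p = some ai :=
    Option.isSome_iff_exists.mp ((PySem.List.index?_isSome_iff (xs := pvAlpha) (v := p)).mpr hmem)
  obtain ⟨hlt, hget, -⟩ := PySem.List.getElem_of_index?_eq_some hai
  have hlt26 : ai < 26 := by simpa using hlt
  have hgetD : pvAlpha.getD ai ' ' = p := by
    rw [List.getD_eq_getElem _ _ hlt]; exact hget
  have hdrop : pvAlpha.drop ai = pvRun p (26 - ai) := by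
    rw [pv_drop_alpha ai hlt26, hgetD]
  unfold missingLetter missingLetter_alt
  simp only [hts, List.headD_cons, hai]
  set L := (p :: rest).length with hL
  set m := min L (26 - ai) with hm
  have hLr : L = rest.length + 1 := by simp [hL]
  have hm1 : 1 ≤ m := by omega
  have hsub : PySem.List.slice pvAlpha (some (ai : Int)) (some ((L + ai : Nat) : Int)) =
      pvRun p m := by
    rw [PySem.List.slice_natCast, hdrop, pvRun_take]
    congr 1
    omega
  have hrun1 : pvRun p m = p :: pvRun (Char.ofNat (p.toNat + 1)) (m - 1) := by
    obtain ⟨m', hm'⟩ : ∃ m', m = m' + 1 := ⟨m - 1, by omega⟩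
    rw [hm']
    simp [pvRun]
  have hbslice : PySem.List.slice (p :: rest) (some (1 : Int)) (some (m : Int)) =
      rest.take (m - 1) := by
    have h1' : ((1 : Nat) : Int) = (1 : Int) := by norm_num
    rw [← h1', PySem.List.slice_natCast]
    simp
  rw [hsub, hbslice, pvALoop_eq (p :: rest) (pvRun p m) (pvRun p m).length 0 (by omega)]
  simp only [List.drop_zero]
  rw [hrun1]
  exact pvCmp_run (m - 1) p rest (by omega) (by omega)

-- ===== VERDICT (by name: the statement is the Claim_ definition above) =====
theorem missingLetter_spec : Claim_equal_missingLetter := by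
  intro txt _ hpre
  unfold Spec_missingLetter
  exact missingLetter_eq_alt txt hpre
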